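-- pv_equiv track=rewrite | github.com/Sev-ille/Performance-Task | main.py | light
-- ===== SOURCE A (Python) =====
-- def light(list):
--     for item in range(len(list)):
--         if list[item] == "lantern":
--             for i in range(len(list)):
--                 if list[i] == "matches":
--                     return True
--         elif list[item] == "flashlight":
--             for i in range(len(list)):
--                 if list[i] == "lighter and batteries":
--                     return True
--     return False
-- ===== SOURCE B (Python) =====
-- def light(list):
--     has_lantern = has_matches = has_flashlight = has_lighter_batteries = False
--     for item in list:
--         if item == "lantern":
--             has_lantern = True
--         elif item == "matches":
--             has_matches = True
--         elif item == "flashlight":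
--             has_flashlight = True
--         elif item == "lighter and batteries":
--             has_lighter_batteries = True
--     return (has_lantern and has_matches) or (has_flashlight and has_lighter_batteries)
-- ===== Notes on version B (the rewrite author's own statement) =====
-- stated objective: simpler
-- what changed: Replaced A's nested scans (an inner full scan restarted on every 'lantern'/'flashlight' occurrence) by one linear pass that accumulates four boolean flags and combines them at the end.
import Mathlib
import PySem

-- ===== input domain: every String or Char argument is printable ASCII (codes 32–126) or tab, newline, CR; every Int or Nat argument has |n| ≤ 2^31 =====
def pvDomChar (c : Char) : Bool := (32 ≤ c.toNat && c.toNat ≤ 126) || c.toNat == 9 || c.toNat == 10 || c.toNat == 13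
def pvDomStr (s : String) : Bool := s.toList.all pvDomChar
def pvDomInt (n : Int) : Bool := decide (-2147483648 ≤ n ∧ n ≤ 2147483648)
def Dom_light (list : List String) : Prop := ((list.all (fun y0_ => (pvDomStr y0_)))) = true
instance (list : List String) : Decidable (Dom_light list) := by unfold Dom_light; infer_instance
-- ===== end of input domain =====

-- B replaces A's restarted inner scans by one pass that accumulates four boolean flags (simpler).

-- ===== PORT A =====
-- inner 'for i in range(len(list)): if list[i] == tgt: return True' (falls through otherwise)
def lightScan (l : List String) (tgt : String) : List Nat → Bool
  | [] => false
  | i :: is =>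
    if (PySem.List.pyGet? l (i : Int)).getD "" == tgt then true
    else lightScan l tgt is

-- outer 'for item in range(len(list)): …'
def lightOuter (l : List String) : List Nat → Bool
  | [] => false
  | item :: rest =>
    if (PySem.List.pyGet? l (item : Int)).getD "" == "lantern" then
      if lightScan l "matches" (List.range l.length) then true else lightOuter l rest
    else if (PySem.List.pyGet? l (item : Int)).getD "" == "flashlight" then
      if lightScan l "lighter and batteries" (List.range l.length) then true else lightOuter l rest
    else lightOuter l rest

def light (list : List String) : Bool :=
  lightOuter list (List.range list.length)

-- ===== PORT B =====
-- single pass: fold the four flags (has_lantern, has_matches, has_flashlight, has_lighter_batteries)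
def lightStep (s : Bool × Bool × Bool × Bool) (item : String) : Bool × Bool × Bool × Bool :=
  if item == "lantern" then (true, s.2)
  else if item == "matches" then (s.1, true, s.2.2)
  else if item == "flashlight" then (s.1, s.2.1, true, s.2.2.2)
  else if item == "lighter and batteries" then (s.1, s.2.1, s.2.2.1, true)
  else s

def light_alt (list : List String) : Bool :=
  let fl := list.foldl lightStep (false, false, false, false)
  (fl.1 && fl.2.1) || (fl.2.2.1 && fl.2.2.2)

-- ===== PRECONDITION & SPEC =====
def Spec_light (list : List String) (out : Bool) : Prop := out = light_alt list
instance (list : List String) (out : Bool) : Decidable (Spec_light list out) := by unfold Spec_light; infer_instance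

-- ===== CLAIM (what is proved, stated in full; the proofs are below) =====
def Claim_equal_light : Prop := ∀ (list : List String), Dom_light list → Spec_light list (light list)

-- ===== LEMMAS AND PROOFS =====

lemma any_range_get (l : List String) (p : String → Bool) :
    ((List.range l.length).any (fun i => p ((PySem.List.pyGet? l (i : Int)).getD ""))) = l.any p := by
  rw [Bool.eq_iff_iff]
  simp only [List.any_eq_true, List.mem_range]
  constructor
  · rintro ⟨i, hi, hp⟩
    refine ⟨l[i], List.getElem_mem hi, ?_⟩
    rwa [PySem.List.pyGet?_natCast, List.getElem?_eq_getElem hi, Option.getD_some] at hp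
  · rintro ⟨x, hx, hp⟩
    obtain ⟨i, hi, rfl⟩ := List.getElem_of_mem hx
    exact ⟨i, hi, by simp [PySem.List.pyGet?_natCast, List.getElem?_eq_getElem hi, hp]⟩

lemma lightScan_eq_any (l : List String) (tgt : String) (idxs : List Nat) :
    lightScan l tgt idxs = idxs.any (fun i => (PySem.List.pyGet? l (i : Int)).getD "" == tgt) := by
  induction idxs with
  | nil => rfl
  | cons i is ih =>
    simp only [lightScan]
    split_ifs with h <;> simp_all [List.any_cons]

lemma lightScan_range (l : List String) (tgt : String) :
    lightScan l tgt (List.range l.length) = l.contains tgt := by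
  rw [lightScan_eq_any, any_range_get l (fun x => x == tgt)]
  rw [Bool.eq_iff_iff]
  simp only [List.any_eq_true, beq_iff_eq, List.contains_eq_mem, decide_eq_true_eq]
  exact ⟨fun ⟨x, hx, e⟩ => e ▸ hx, fun h => ⟨tgt, h, rfl⟩⟩

lemma lightOuter_eq_any (l : List String) (idxs : List Nat) :
    lightOuter l idxs =
      idxs.any (fun i =>
        ((PySem.List.pyGet? l (i : Int)).getD "" == "lantern"
            && lightScan l "matches" (List.range l.length))
        || ((PySem.List.pyGet? l (i : Int)).getD "" == "flashlight"
            && lightScan l "lighter and batteries" (List.range l.length))) := by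
  induction idxs with
  | nil => rfl
  | cons i is ih =>
    simp only [lightOuter, List.any_cons]
    split_ifs with h1 h2 h3 h4 <;> simp_all [beq_iff_eq]

lemma strBeq_false {a b : String} (h : ¬ a = b) : (a == b) = false := by
  simp [h]

lemma any_key (l : List String) (cm cb : Bool) :
    (l.any (fun x => (x == "lantern" && cm) || (x == "flashlight" && cb)))
      = ((l.contains "lantern" && cm) || (l.contains "flashlight" && cb)) := by
  rw [Bool.eq_iff_iff]
  simp only [List.any_eq_true, Bool.or_eq_true, Bool.and_eq_true, beq_iff_eq,
    List.contains_eq_mem, decide_eq_true_eq]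
  constructor
  · rintro ⟨x, hx, ⟨rfl, hc⟩ | ⟨rfl, hc⟩⟩
    · exact Or.inl ⟨hx, hc⟩
    · exact Or.inr ⟨hx, hc⟩
  · rintro (⟨hx, hc⟩ | ⟨hx, hc⟩)
    · exact ⟨_, hx, Or.inl ⟨rfl, hc⟩⟩
    · exact ⟨_, hx, Or.inr ⟨rfl, hc⟩⟩

lemma light_eq_key (l : List String) :
    light l = ((l.contains "lantern" && l.contains "matches")
      || (l.contains "flashlight" && l.contains "lighter and batteries")) := by
  unfold light
  rw [lightOuter_eq_any, lightScan_range, lightScan_range,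
    any_range_get l (fun x => (x == "lantern" && l.contains "matches")
      || (x == "flashlight" && l.contains "lighter and batteries")),
    any_key]

lemma fold_flags (l : List String) (a b c d : Bool) :
    l.foldl lightStep (a, b, c, d)
      = (a || l.contains "lantern", b || l.contains "matches",
         c || l.contains "flashlight", d || l.contains "lighter and batteries") := by
  induction l generalizing a b c d with
  | nil => simp
  | cons x xs ih =>
    simp only [List.foldl_cons, List.contains_cons, lightStep]
    by_cases h1 : x = "lantern" <;> by_cases h2 : x = "matches" <;>
      by_cases h3 : x = "flashlight" <;> by_cases h4 : x = "lighter and batteries" <;>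
      simp [h1, h2, h3, h4, ih, strBeq_false, eq_comm]

lemma light_alt_eq_key (l : List String) :
    light_alt l = ((l.contains "lantern" && l.contains "matches")
      || (l.contains "flashlight" && l.contains "lighter and batteries")) := by
  unfold light_alt
  rw [fold_flags]
  simp

-- ===== VERDICT (by name: the statement is the Claim_ definition above) =====
theorem light_spec : Claim_equal_light := by
  intro l _
  unfold Spec_light
  rw [light_eq_key, light_alt_eq_key]
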